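-- pv_equiv track=rewrite | github.com/TitanicThompson1/FPRO | Testes/outroPE2/exactly.py | exactly
-- ===== SOURCE A (Python) =====
-- def exactly(s):
--     question_marks=0
--     result=()
--     for i,charac in enumerate(s):
--         if charac.isdigit():
--             for j,o_chr in enumerate(s):
--                 if j>i:
--                     if o_chr.isdigit() and int(o_chr)+int(charac)==10:
--                         if question_marks!=3:
--                             return "The sequence {0} is NOT OK with first violation with pair: {1}".format(s,(charac+o_chr,))
--                         elif question_marks==3:
--                             result+=(charac+o_chr,)
--                     elif o_chr=="?":
--                         question_marks+=1
--         question_marks=0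
--     return "The sequence {0} is OK with the pairs: {1}".format(s,result)
-- ===== SOURCE B (Python) =====
-- def exactly(s):
--     # prefix question-mark counts: P[k] = number of '?' in s[:k]
--     P = [0]
--     for ch in s:
--         P.append(P[-1] + (1 if ch == '?' else 0))
--     # positions of digits, in order
--     D = [(i, ch) for i, ch in enumerate(s) if ch.isdigit()]
--     pairs = []
--     for k, (i, ci) in enumerate(D):
--         for j, cj in D[k + 1:]:
--             if int(cj) + int(ci) == 10:
--                 if P[j] - P[i + 1] != 3:
--                     return "The sequence {0} is NOT OK with first violation with pair: {1}".format(s, (ci + cj,))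
--                 pairs.append(ci + cj)
--     return "The sequence {0} is OK with the pairs: {1}".format(s, tuple(pairs))
-- ===== Notes on version B (the rewrite author's own statement) =====
-- stated objective: alternative
-- what changed: Replaces A's full rescan of the string per digit (with a running question-mark counter) by a precomputed prefix-sum table of question-mark counts and a precomputed list of digit positions, iterating only over ordered digit pairs and reading the between count as a prefix difference.
import Mathlib
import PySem

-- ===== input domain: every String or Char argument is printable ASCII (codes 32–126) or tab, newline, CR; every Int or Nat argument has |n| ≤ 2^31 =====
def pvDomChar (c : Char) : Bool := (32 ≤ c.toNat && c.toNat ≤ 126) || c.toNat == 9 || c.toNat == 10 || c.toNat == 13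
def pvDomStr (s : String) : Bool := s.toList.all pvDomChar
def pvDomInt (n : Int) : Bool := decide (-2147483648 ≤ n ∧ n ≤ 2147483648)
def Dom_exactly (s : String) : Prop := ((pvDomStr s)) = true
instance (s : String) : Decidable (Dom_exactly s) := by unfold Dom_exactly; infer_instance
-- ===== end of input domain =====

-- B replaces A's rescan of the whole string per digit (with a running question-mark counter)
-- by a prefix-sum table of question-mark counts and a precomputed list of digit positions,
-- iterating only over digit pairs; objective: alternative (same results, different data structures).

-- shared message/format helpers (both Pythons build these exact strings via .format)
-- Python repr of a tuple of digit-only strings (no quoting subtleties: pair strings are digits)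
def tupleRepr (xs : List String) : String :=
  match xs with
  | [] => "()"
  | [x] => "('" ++ x ++ "',)"
  | _ => "(" ++ String.intercalate ", " (xs.map (fun x => "'" ++ x ++ "'")) ++ ")"

def msgNotOk (s p : String) : String :=
  "The sequence " ++ s ++ " is NOT OK with first violation with pair: " ++ tupleRepr [p]

def msgOk (s : String) (res : List String) : String :=
  "The sequence " ++ s ++ " is OK with the pairs: " ++ tupleRepr res

-- int(c) for a char that the guard 'c.isdigit()' has already accepted (exact on the ASCII domain)
def pyIntChar (c : Char) : Int := (PySem.Int.ofStr? (String.ofList [c])).getD 0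

-- ===== PORT A =====
-- A's inner loop over enumerate(s), state: question_marks and the result tuple;
-- .error = the early 'return' of the NOT-OK message
def innerA (s : String) (i : Int) (ci : Char) :
    List (Int × Char) → Int → List String → Except String (List String)
  | [], _, res => .ok res
  | (j, c) :: rest, qm, res =>
    if j > i then
      if PySem.Chars.isdigit c && decide (pyIntChar c + pyIntChar ci = 10) then
        if qm ≠ 3 then .error (msgNotOk s (String.ofList [ci, c]))
        else innerA s i ci rest qm (res ++ [String.ofList [ci, c]])
      else if c = '?' then innerA s i ci rest (qm + 1) res
      else innerA s i ci rest qm res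
    else innerA s i ci rest qm res

-- A's outer loop over enumerate(s); question_marks starts each inner scan at 0
def outerA (s : String) : List (Int × Char) → List String → Except String (List String)
  | [], res => .ok res
  | (i, ci) :: rest, res =>
    if PySem.Chars.isdigit ci then
      match innerA s i ci (PySem.List.enumerate s.toList 0) 0 res with
      | .error m => .error m
      | .ok res' => outerA s rest res'
    else outerA s rest res

def exactly (s : String) : String :=
  match outerA s (PySem.List.enumerate s.toList 0) [] with
  | .error m => m
  | .ok res => msgOk s res

-- ===== PORT B =====
-- prefix question-mark counts: P = [0] then P.append(P[-1] + (ch == '?')) per char (last value threaded)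
def qpreAux (last : Int) : List Char → List Int
  | [] => []
  | c :: cs =>
    let v := last + (if c = '?' then 1 else 0)
    v :: qpreAux v cs

def qpre (cs : List Char) : List Int := 0 :: qpreAux 0 cs

-- B's inner loop: only the digit positions after i; question-mark count between via the prefix table
def innerB (s : String) (P : List Int) (i : Int) (ci : Char) :
    List (Int × Char) → List String → Except String (List String)
  | [], res => .ok res
  | (j, cj) :: rest, res =>
    if decide (pyIntChar cj + pyIntChar ci = 10) then
      if PySem.List.pyGetD P j 0 - PySem.List.pyGetD P (i + 1) 0 ≠ 3 then
        .error (msgNotOk s (String.ofList [ci, cj]))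
      else innerB s P i ci rest (res ++ [String.ofList [ci, cj]])
    else innerB s P i ci rest res

-- B's outer loop over the digit-position list D (each element with the rest = D[k+1:])
def loopB (s : String) (P : List Int) : List (Int × Char) → List String → Except String (List String)
  | [], res => .ok res
  | (i, ci) :: rest, res =>
    match innerB s P i ci rest res with
    | .error m => .error m
    | .ok res' => loopB s P rest res'

def exactly_alt (s : String) : String :=
  let P := qpre s.toList
  let D := (PySem.List.enumerate s.toList 0).filter (fun p => PySem.Chars.isdigit p.2)
  match loopB s P D [] with
  | .error m => m
  | .ok res => msgOk s res

-- ===== PRECONDITION & SPEC =====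
def Spec_exactly (s : String) (out : String) : Prop := out = exactly_alt s
instance (s : String) (out : String) : Decidable (Spec_exactly s out) := by unfold Spec_exactly; infer_instance

-- ===== CLAIM (what is proved, stated in full; the proofs are below) =====
def Claim_equal_exactly : Prop := ∀ (s : String), Dom_exactly s → Spec_exactly s (exactly s)

-- ===== LEMMAS AND PROOFS =====

-- prefix-table value: (qpre cs)[k] = number of question marks in cs.take k
theorem qpreAux_getElem? (cs : List Char) (base : Int) (k : Nat) (hk : k < cs.length) :
    (qpreAux base cs)[k]? = some (base + ((cs.take (k + 1)).countP (· = '?') : Int)) := by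
  induction cs generalizing base k with
  | nil => simp at hk
  | cons c cs ih =>
    cases k with
    | zero =>
      simp only [qpreAux, List.getElem?_cons_zero, List.take_succ_cons, List.take_zero,
        List.countP_cons, List.countP_nil]
      by_cases h : c = '?' <;> simp [h]
    | succ k =>
      simp only [qpreAux, List.getElem?_cons_succ]
      rw [ih _ k (by simpa using hk)]
      simp only [List.take_succ_cons, List.countP_cons]
      by_cases h : c = '?'
      · simp [h]
        ring
      · simp [h]

theorem qpre_getElem? (cs : List Char) (k : Nat) (hk : k ≤ cs.length) :
    (qpre cs)[k]? = some (((cs.take k).countP (· = '?') : Int)) := by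
  cases k with
  | zero => simp [qpre]
  | succ k =>
    simp only [qpre, List.getElem?_cons_succ]
    rw [qpreAux_getElem? cs 0 k (by omega)]
    simp

-- Pd cs k = P[k] for a Nat index
def Pd (cs : List Char) (k : Nat) : Int := PySem.List.pyGetD (qpre cs) (↑k) 0

theorem Pd_eq (cs : List Char) (k : Nat) (hk : k ≤ cs.length) :
    Pd cs k = ((cs.take k).countP (· = '?') : Int) := by
  have h := qpre_getElem? cs k hk
  simp [Pd, PySem.List.pyGetD_natCast, List.getD, h]

-- step: P[t+1] = P[t] + (one if the char at t is a question mark)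
theorem Pd_step (cs : List Char) (t : Nat) (c : Char) (ht : cs.drop t = c :: cs.drop (t + 1))
    (hlen : t < cs.length) :
    Pd cs (t + 1) = Pd cs t + (if c = '?' then 1 else 0) := by
  rw [Pd_eq cs (t + 1) (by omega), Pd_eq cs t (by omega)]
  have htake : cs.take (t + 1) = cs.take t ++ [c] := by
    have h1 : cs.take (t + 1) = cs.take t ++ (cs.drop t).take 1 := by
      rw [← List.take_add]
    rw [h1, ht]
    simp
  rw [htake, List.countP_append]
  simp only [List.countP_cons, List.countP_nil]
  by_cases h : c = '?' <;> simp [h]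

-- A's inner loop skips every index ≤ i
theorem innerA_skip (s : String) (iN : Nat) (ci : Char) (l : List Char) (t : Nat)
    (rest : List (Int × Char)) (qm : Int) (res : List String)
    (hle : t + l.length ≤ iN + 1) :
    innerA s (↑iN) ci (PySem.List.enumerate l (↑t) ++ rest) qm res
      = innerA s (↑iN) ci rest qm res := by
  induction l generalizing t with
  | nil => simp [PySem.List.enumerate_nil]
  | cons c l ih =>
    rw [PySem.List.enumerate_cons]
    simp only [List.cons_append, innerA]
    have hnot : ¬ ((↑t : Int) > ↑iN) := by
      simp at hle ⊢; omega
    rw [if_neg hnot]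
    have : ((↑t : Int) + 1) = ↑(t + 1) := by push_cast; ring
    rw [this, ih (t + 1) (by simp at hle ⊢; omega)]

-- core: A's scan from position t (> i) with running counter qm = P[t] - P[i+1]
-- equals B's walk over the digit positions of the same suffix
theorem inner_eq (s : String) (cs : List Char) (iN : Nat) (ci : Char) :
    ∀ (l : List Char) (t : Nat) (qm : Int) (res : List String),
    cs.drop t = l → iN < t → qm = Pd cs t - Pd cs (iN + 1) →
    innerA s (↑iN) ci (PySem.List.enumerate l (↑t)) qm res
      = innerB s (qpre cs) (↑iN) ci
          ((PySem.List.enumerate l (↑t)).filter (fun p => PySem.Chars.isdigit p.2)) res := by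
  intro l
  induction l with
  | nil => intro t qm res _ _ _; simp [PySem.List.enumerate_nil, innerA, innerB]
  | cons c l ih =>
    intro t qm res hdrop hti hqm
    have hlen : t < cs.length := by
      by_contra h
      rw [List.drop_eq_nil_of_le (by omega)] at hdrop
      exact List.cons_ne_nil _ _ hdrop.symm
    have hdrop' : cs.drop (t + 1) = l := by
      have h := congrArg (List.drop 1) hdrop
      rw [List.drop_drop] at h
      simpa using h
    have hstep : Pd cs (t + 1) = Pd cs t + (if c = '?' then 1 else 0) := by
      apply Pd_step cs t c _ hlen
      rw [hdrop, hdrop']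
    rw [PySem.List.enumerate_cons]
    simp only [innerA]
    have hgt : (↑t : Int) > ↑iN := by exact_mod_cast hti
    rw [if_pos hgt]
    have hcast : ((↑t : Int) + 1) = ↑(t + 1) := by push_cast; ring
    by_cases hd : PySem.Chars.isdigit c = true
    · -- c is a digit: appears in B's filtered list
      have hcq : ¬ (c = '?') := by
        intro h; subst h; simp [PySem.Chars.isdigit] at hd
      rw [List.filter_cons_of_pos (by simpa using hd)]
      simp only [innerB, hd, Bool.true_and]
      by_cases hsum : pyIntChar c + pyIntChar ci = 10
      · simp only [hsum, decide_true, if_true]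
        have hq : PySem.List.pyGetD (qpre cs) (↑t) 0
            - PySem.List.pyGetD (qpre cs) (↑iN + 1) 0 = qm := by
          have : ((↑iN : Int) + 1) = ↑(iN + 1) := by push_cast; ring
          rw [this, hqm]; rfl
        rw [hq]
        by_cases h3 : qm = 3
        · subst h3
          simp only [ne_eq, not_true_eq_false, if_false]
          rw [hcast, ih (t + 1) 3 (res ++ [String.ofList [ci, c]]) hdrop' (by omega)
            (by rw [hstep, if_neg hcq, add_zero]; exact hqm)]
        · simp only [ne_eq, h3, not_false_eq_true, if_true]
      · simp only [hsum, decide_false, Bool.false_eq_true, if_false, if_neg hcq]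
        rw [hcast, ih (t + 1) qm res hdrop' (by omega)
          (by rw [hstep, if_neg hcq, add_zero]; exact hqm)]
    · -- c is not a digit: filtered out on B's side
      rw [List.filter_cons_of_neg (by simpa using hd)]
      simp only [hd, Bool.false_and, Bool.false_eq_true, if_false]
      by_cases hcq : c = '?'
      · rw [if_pos hcq, hcast, ih (t + 1) (qm + 1) res hdrop' (by omega)
          (by rw [hstep, if_pos hcq, hqm]; ring)]
      · rw [if_neg hcq, hcast, ih (t + 1) qm res hdrop' (by omega)
          (by rw [hstep, if_neg hcq, add_zero]; exact hqm)]

-- A's full inner scan (from index 0, counter 0) for a digit at position i equals B's walk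
theorem innerA_full (s : String) (cs : List Char) (iN : Nat) (ci : Char)
    (hi : iN < cs.length) (res : List String) :
    innerA s (↑iN) ci (PySem.List.enumerate cs 0) 0 res
      = innerB s (qpre cs) (↑iN) ci
          ((PySem.List.enumerate (cs.drop (iN + 1)) (↑(iN + 1))).filter
            (fun p => PySem.Chars.isdigit p.2)) res := by
  have hsplit : cs = cs.take (iN + 1) ++ cs.drop (iN + 1) := (List.take_append_drop _ _).symm
  have hlen : (cs.take (iN + 1)).length = iN + 1 := by simp; omega
  calc innerA s (↑iN) ci (PySem.List.enumerate cs 0) 0 res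
      = innerA s (↑iN) ci (PySem.List.enumerate (cs.take (iN + 1)) 0
          ++ PySem.List.enumerate (cs.drop (iN + 1)) (0 + ↑(cs.take (iN + 1)).length)) 0 res := by
        conv_lhs => rw [hsplit]
        rw [PySem.List.enumerate_append]
    _ = innerA s (↑iN) ci (PySem.List.enumerate (cs.drop (iN + 1)) (↑(iN + 1))) 0 res := by
        rw [hlen]
        have h0 : ((0 : Int) + ↑(iN + 1)) = ↑(iN + 1) := by ring
        rw [h0]
        exact innerA_skip s iN ci (cs.take (iN + 1)) 0 _ 0 res (by rw [hlen]; omega)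
    _ = _ := by
        apply inner_eq s cs iN ci (cs.drop (iN + 1)) (iN + 1) 0 res rfl (by omega)
        ring

-- outer loops agree: A over the suffix enumerate, B over its digit positions
theorem outer_eq (s : String) (cs : List Char) (hcs : cs = s.toList) :
    ∀ (l : List Char) (t : Nat), cs.drop t = l →
    ∀ (res : List String),
    outerA s (PySem.List.enumerate l (↑t)) res
      = loopB s (qpre cs) ((PySem.List.enumerate l (↑t)).filter
          (fun p => PySem.Chars.isdigit p.2)) res := by
  intro l
  induction l with
  | nil => intro t _ res; simp [PySem.List.enumerate_nil, outerA, loopB]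
  | cons c l ih =>
    intro t hdrop res
    have hlen : t < cs.length := by
      by_contra hc
      rw [List.drop_eq_nil_of_le (by omega)] at hdrop
      exact List.cons_ne_nil _ _ hdrop.symm
    have hdrop' : cs.drop (t + 1) = l := by
      have h := congrArg (List.drop 1) hdrop
      rw [List.drop_drop] at h
      simpa using h
    have hcast : ((↑t : Int) + 1) = ↑(t + 1) := by push_cast; ring
    rw [PySem.List.enumerate_cons]
    by_cases hd : PySem.Chars.isdigit c = true
    · rw [List.filter_cons_of_pos (by simpa using hd)]
      simp only [outerA, hd, if_true, loopB]
      have hfull := innerA_full s cs t c hlen res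
      rw [hcs] at hfull
      rw [hfull, ← hcs]
      rw [hcast, hdrop']
      cases hin : innerB s (qpre cs) (↑t) c
          ((PySem.List.enumerate l (↑(t+1))).filter (fun p => PySem.Chars.isdigit p.2)) res with
      | error m => rfl
      | ok res' =>
        exact ih (t + 1) hdrop' res'
    · rw [List.filter_cons_of_neg (by simpa using hd)]
      simp only [outerA, hd, Bool.false_eq_true, if_false]
      rw [hcast, ih (t + 1) hdrop' res]

-- ===== VERDICT (by name: the statement is the Claim_ definition above) =====
theorem exactly_spec : Claim_equal_exactly := by
  unfold Claim_equal_exactly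
  intro s _
  unfold Spec_exactly exactly exactly_alt
  have h := outer_eq s s.toList rfl s.toList 0 (by simp) []
  rw [show ((0 : Nat) : Int) = 0 from rfl] at h
  rw [h]
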